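-- pv_equiv track=rewrite | github.com/anshita-sharma-iiserp/CFG_Project_Anshita_Urvija_ | MarkovCrossValidation.py | build_counts
-- ===== SOURCE A (Python) =====
-- from collections import Counter
--
-- def build_counts(seqs, m):
--     counts = {}
--     for s in seqs:
--         for i in range(m, len(s)):
--             ctx = s[i - m:i] if m > 0 else ""
--             base = s[i]
--             if (len(ctx) != m) or (base not in "ACGT") or any(ch not in "ACGT" for ch in ctx):
--                 continue
--             counts.setdefault(ctx, Counter())[base] += 1
--     return counts
-- ===== SOURCE B (Python) =====
-- from collections import Counter
--
-- def build_counts(seqs, m):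
--     # One pass per sequence with a running run-length of consecutive ACGT
--     # characters: position i contributes iff the run ending at i has length
--     # >= m+1, so no per-position rescan of the context is needed.
--     if m < 0:
--         return {}
--     counts = {}
--     for s in seqs:
--         if len(s) <= m:
--             continue  # no run of m+1 characters fits
--         run = 0
--         for i in range(len(s)):
--             run = run + 1 if s[i] in "ACGT" else 0
--             if run >= m + 1:
--                 counts.setdefault(s[i - m:i], Counter())[s[i]] += 1
--     return counts
-- ===== Notes on version B (the rewrite author's own statement) =====
-- stated objective: faster
-- what changed: B replaces A's per-position validation (slicing the m-char context and rescanning it at every index) with a single running run-length counter of consecutive ACGT characters per sequence, incrementing a count only when the run reaches m+1; sequences shorter than m+1 are skipped and m < 0 returns {} up front.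
import Mathlib
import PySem

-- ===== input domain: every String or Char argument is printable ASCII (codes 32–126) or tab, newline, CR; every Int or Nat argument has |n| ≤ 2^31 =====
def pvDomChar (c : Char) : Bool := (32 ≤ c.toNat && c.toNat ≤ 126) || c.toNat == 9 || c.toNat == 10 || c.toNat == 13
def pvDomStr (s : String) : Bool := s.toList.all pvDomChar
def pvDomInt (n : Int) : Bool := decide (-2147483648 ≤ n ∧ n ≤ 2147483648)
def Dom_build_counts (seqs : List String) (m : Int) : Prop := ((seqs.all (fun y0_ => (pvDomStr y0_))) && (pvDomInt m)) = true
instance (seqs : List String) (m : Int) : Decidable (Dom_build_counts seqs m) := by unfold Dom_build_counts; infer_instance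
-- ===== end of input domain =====

-- B keeps a running run-length of consecutive ACGT characters per sequence instead of
-- re-validating the m-char context at every position (alternative one-pass decomposition).


-- ===== PORT A =====
-- 'counts.setdefault(ctx, Counter())[base] += 1' — the identical line occurs in both Pythons
def pvBump (d : PySem.Dict String (PySem.Dict String Int)) (ctx base : String) :
    PySem.Dict String (PySem.Dict String Int) :=
  let d1 := d.setdefault ctx PySem.Dict.empty
  let c := d1.getD ctx PySem.Dict.empty
  d1.insert ctx (c.insert base (c.getD base 0 + 1))

-- body of A's inner 'for i in range(m, len(s))' loop
def pvAStep (m : Int) (s : String) (counts : PySem.Dict String (PySem.Dict String Int)) (i : Int) :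
    PySem.Dict String (PySem.Dict String Int) :=
  let ctx : String := if m > 0 then PySem.Str.slice s (some (i - m)) (some i) else ""
  match PySem.Str.pyGet? s i with
  | none => counts        -- Python raises IndexError here; Pre_build_counts excludes these inputs
  | some bc =>
    let base := String.singleton bc
    if ((PySem.Str.len ctx : Int) != m) || !(PySem.Str.isIn base "ACGT")
        || ctx.toList.any (fun ch => !(PySem.Str.isIn (String.singleton ch) "ACGT"))
    then counts
    else pvBump counts ctx base

def pvAStr (m : Int) (counts : PySem.Dict String (PySem.Dict String Int)) (s : String) :
    PySem.Dict String (PySem.Dict String Int) :=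
  (PySem.List.pyRange m (PySem.Str.len s) 1).foldl (pvAStep m s) counts

def build_counts (seqs : List String) (m : Int) : List (String × List (String × Int)) :=
  ((seqs.foldl (pvAStr m) PySem.Dict.empty).items).map (fun p => (p.1, p.2.items))

-- ===== PORT B =====
-- body of B's inner 'for i in range(len(s))' loop; state = (counts, run)
def pvBStep (m : Int) (s : String) (st : PySem.Dict String (PySem.Dict String Int) × Int) (i : Int) :
    PySem.Dict String (PySem.Dict String Int) × Int :=
  match PySem.Str.pyGet? s i with
  | none => st            -- unreachable: 0 ≤ i < len(s)
  | some c =>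
    let run : Int := if PySem.Str.isIn (String.singleton c) "ACGT" then st.2 + 1 else 0
    if run ≥ m + 1 then
      (pvBump st.1 (PySem.Str.slice s (some (i - m)) (some i)) (String.singleton c), run)
    else (st.1, run)

def pvBStr (m : Int) (counts : PySem.Dict String (PySem.Dict String Int)) (s : String) :
    PySem.Dict String (PySem.Dict String Int) :=
  if PySem.Str.len s ≤ m then counts    -- 'if len(s) <= m: continue'
  else ((PySem.List.pyRange 0 (PySem.Str.len s) 1).foldl (pvBStep m s) (counts, 0)).1

def build_counts_alt (seqs : List String) (m : Int) : List (String × List (String × Int)) :=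
  if m < 0 then []
  else ((seqs.foldl (pvBStr m) PySem.Dict.empty).items).map (fun p => (p.1, p.2.items))

-- ===== PRECONDITION & SPEC =====
-- Pre_ excludes exactly the inputs where A raises IndexError: m < 0 together with some
-- sequence shorter than -m (then s[m] is an out-of-range negative index).
def Pre_build_counts (seqs : List String) (m : Int) : Prop :=
  m < 0 → ∀ s ∈ seqs, -m ≤ (PySem.Str.len s : Int)
instance (seqs : List String) (m : Int) : Decidable (Pre_build_counts seqs m) := by
  unfold Pre_build_counts; infer_instance
def pvWitness_build_counts : List String × Int := (["ACGTN", "TTAC"], 1)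

def Spec_build_counts (seqs : List String) (m : Int) (out : List (String × List (String × Int))) : Prop := out = build_counts_alt seqs m
instance (seqs : List String) (m : Int) (out : List (String × List (String × Int))) : Decidable (Spec_build_counts seqs m out) := by unfold Spec_build_counts; infer_instance

-- ===== CLAIM (what is proved, stated in full; the proofs are below) =====
def Claim_equal_build_counts : Prop := ∀ (seqs : List String) (m : Int), Dom_build_counts seqs m → Pre_build_counts seqs m → Spec_build_counts seqs m (build_counts seqs m)

-- ===== LEMMAS AND PROOFS =====

def pvACGT : List Char := ['A','C','G','T']

def pvTrail (cs : List Char) : Nat → Int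
  | 0 => 0
  | k+1 => if cs.getD k ' ' ∈ pvACGT then pvTrail cs k + 1 else 0

lemma pvTrail_bounds (cs : List Char) (k : Nat) : 0 ≤ pvTrail cs k ∧ pvTrail cs k ≤ (k : Int) := by
  induction k with
  | zero => simp [pvTrail]
  | succ k ih =>
    simp only [pvTrail]
    obtain ⟨i1, i2⟩ := ih
    split_ifs with h
    · omega
    · constructor <;> omega

lemma pvTrail_ge (cs : List Char) (k r : Nat) :
    ((r : Int) ≤ pvTrail cs k) ↔ (r ≤ k ∧ ∀ j < r, cs.getD (k-1-j) ' ' ∈ pvACGT) := by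
  induction k generalizing r with
  | zero => simp [pvTrail]; omega
  | succ k ih =>
    simp only [pvTrail]
    split_ifs with hc
    · constructor
      · intro h
        rcases Nat.eq_zero_or_pos r with hr | hr
        · subst hr; exact ⟨Nat.zero_le _, by omega⟩
        · have h' : ((r-1 : Nat) : Int) ≤ pvTrail cs k := by
            have : ((r-1 : Nat) : Int) = (r : Int) - 1 := by omega
            omega
          obtain ⟨h1, h2⟩ := (ih (r-1)).mp h'
          refine ⟨by omega, ?_⟩
          intro j hj
          rcases Nat.eq_zero_or_pos j with hj0 | hj0
          · subst hj0; simpa using hc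
          · have := h2 (j-1) (by omega)
            have e : k - 1 - (j-1) = k + 1 - 1 - j := by omega
            rwa [e] at this
      · rintro ⟨h1, h2⟩
        rcases Nat.eq_zero_or_pos r with hr | hr
        · subst hr
          have := (pvTrail_bounds cs k).1
          omega
        · have h2' : ∀ j < r - 1, cs.getD (k-1-j) ' ' ∈ pvACGT := by
            intro j hj
            have := h2 (j+1) (by omega)
            have e : k + 1 - 1 - (j+1) = k - 1 - j := by omega
            rwa [e] at this
          have hih := (ih (r-1)).mpr ⟨by omega, h2'⟩
          have : ((r-1 : Nat) : Int) = (r : Int) - 1 := by omega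
          omega
    · constructor
      · intro h
        have h0 := (pvTrail_bounds cs k).1
        have hr : r = 0 := by omega
        subst hr; exact ⟨Nat.zero_le _, by omega⟩
      · rintro ⟨h1, h2⟩
        rcases Nat.eq_zero_or_pos r with hr | hr
        · subst hr; omega
        · exact absurd (by simpa using h2 0 hr) hc

lemma pvIsIn_singleton' (c : Char) :
    PySem.Chars.isIn [c] ['A', 'C', 'G', 'T'] = decide (c ∈ pvACGT) := by
  rw [Bool.eq_iff_iff, PySem.Chars.isIn_iff_infix]
  simp [List.singleton_infix_iff, pvACGT]

lemma pvAll_slice (cs : List Char) (a mN : Nat) (h : a + mN ≤ cs.length) :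
    (∀ ch ∈ (cs.drop a).take mN, ch ∈ pvACGT) ↔ ∀ idx < mN, cs.getD (a+idx) ' ' ∈ pvACGT := by
  have hlen : (cs.drop a).length = cs.length - a := by simp
  constructor
  · intro hall idx hidx
    have hlt : idx < (cs.drop a).length := by omega
    have hmem : (cs.drop a)[idx] ∈ (cs.drop a).take mN :=
      List.mem_take_iff_getElem.mpr ⟨idx, by omega, rfl⟩
    have hgd : (cs.drop a)[idx] = cs.getD (a+idx) ' ' := by
      rw [List.getElem_drop, List.getD_eq_getElem cs ' ' (by omega)]
    rw [← hgd]
    exact hall _ hmem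
  · intro hall ch hch
    obtain ⟨i, hi, rfl⟩ := List.mem_take_iff_getElem.mp hch
    have hi' : i < mN := by omega
    have hgd : (cs.drop a)[i] = cs.getD (a+i) ' ' := by
      rw [List.getElem_drop, List.getD_eq_getElem cs ' ' (by omega)]
    rw [hgd]
    exact hall i hi'

lemma pvGuard (cs : List Char) (mN k : Nat) (hmk : mN ≤ k) :
    ((mN : Int) + 1 ≤ pvTrail cs (k+1)) ↔
      (cs.getD k ' ' ∈ pvACGT ∧ ∀ idx < mN, cs.getD (k - mN + idx) ' ' ∈ pvACGT) := by
  have hT := pvTrail_ge cs (k+1) (mN+1)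
  rw [show ((mN+1 : Nat) : Int) = (mN : Int) + 1 by omega] at hT
  rw [hT]
  constructor
  · rintro ⟨-, h⟩
    refine ⟨by simpa using h 0 (by omega), ?_⟩
    intro idx hidx
    have := h (mN - idx) (by omega)
    have e : k + 1 - 1 - (mN - idx) = k - mN + idx := by omega
    rwa [e] at this
  · rintro ⟨h0, h⟩
    refine ⟨by omega, ?_⟩
    intro j hj
    rcases Nat.eq_zero_or_pos j with hj0 | hj0
    · subst hj0; simpa using h0
    · have := h (mN - j) (by omega)
      have e : k - mN + (mN - j) = k + 1 - 1 - j := by omega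
      rwa [e] at this

lemma pvStep_eq (m : Int) (hm : 0 ≤ m) (s : String) (k : Nat) (hmk : m ≤ (k : Int))
    (hk : k < s.toList.length) (d : PySem.Dict String (PySem.Dict String Int)) :
    pvAStep m s d (k : Int)
      = if m + 1 ≤ pvTrail s.toList (k+1)
        then pvBump d (PySem.Str.slice s (some ((k : Int) - m)) (some (k : Int)))
               (String.singleton (s.toList.getD k ' '))
        else d := by
  have hmm : m = (m.toNat : Int) := by omega
  set cs := s.toList with hcs
  set mN := m.toNat with hmN
  have hmkN : mN ≤ k := by omega
  have hget : PySem.Str.pyGet? s (k : Int) = some (cs.getD k ' ') := by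
    rw [PySem.Str.pyGet?_natCast]
    rw [List.getElem?_eq_getElem hk, List.getD_eq_getElem cs ' ' hk]
  have hslice : (PySem.Str.slice s (some ((k : Int) - m)) (some (k : Int))).toList
      = (cs.drop (k - mN)).take mN := by
    rw [PySem.Str.toList_slice, PySem.Chars.slice_eq_listSlice]
    rw [show (k : Int) - m = ((k - mN : Nat) : Int) by omega,
        show (k : Int) = ((k : Nat) : Int) from rfl,
        PySem.List.slice_natCast]
    congr 1
    omega
  have hctx : (if m > 0 then PySem.Str.slice s (some ((k : Int) - m)) (some (k : Int)) else "")
      = PySem.Str.slice s (some ((k : Int) - m)) (some (k : Int)) := by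
    by_cases hm0 : m > 0
    · simp [hm0]
    · have hmz : m = 0 := by omega
      have hmNz : mN = 0 := by omega
      simp only [hm0, if_false]
      refine (String.toList_inj.mp ?_).symm
      rw [hslice, hmNz]
      rfl
  have hlen : PySem.Str.len (PySem.Str.slice s (some ((k : Int) - m)) (some (k : Int))) = m := by
    rw [PySem.Str.len_eq, hslice]
    rw [List.length_take, List.length_drop]
    omega
  have hcond : (m + 1 ≤ pvTrail cs (k+1))
      ↔ (cs.getD k ' ' ∈ pvACGT ∧
          ∀ ch ∈ (PySem.Str.slice s (some ((k : Int) - m)) (some (k : Int))).toList, ch ∈ pvACGT) := by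
    rw [hslice, hmm]
    rw [pvGuard cs mN k hmkN]
    rw [pvAll_slice cs (k - mN) mN (by omega)]
  have hbool : ((PySem.Str.len (PySem.Str.slice s (some ((k : Int) - m)) (some (k : Int))) != m)
      || !(PySem.Str.isIn (String.singleton (cs.getD k ' ')) "ACGT")
      || ((PySem.Str.slice s (some ((k : Int) - m)) (some (k : Int))).toList.any
            (fun ch => !(PySem.Str.isIn (String.singleton ch) "ACGT"))))
      = !(decide (m + 1 ≤ pvTrail cs (k+1))) := by
    have hgd : cs.getD k ' ' = cs[k]?.getD ' ' := rfl
    by_cases hg : m + 1 ≤ pvTrail cs (k+1)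
    · obtain ⟨hc, hall⟩ := hcond.mp hg
      have b1 : (PySem.Str.len (PySem.Str.slice s (some ((k : Int) - m)) (some (k : Int))) != m) = false := by
        rw [hlen]
        simp
      have b3 : ((PySem.Str.slice s (some ((k : Int) - m)) (some (k : Int))).toList.any
          (fun ch => !(PySem.Str.isIn (String.singleton ch) "ACGT"))) = false := by
        rw [List.any_eq_false]
        intro ch hch
        simp [pvIsIn_singleton', hall ch hch]
      rw [b1, b3]
      rw [hgd] at hc
      simp [pvIsIn_singleton', hc, hg]
    · rw [show (!(decide (m + 1 ≤ pvTrail cs (k+1)))) = true by simp [hg]]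
      rw [not_iff_not.mpr hcond] at hg
      rw [not_and_or] at hg
      rcases hg with hc | hnall
      · rw [hgd] at hc
        simp [pvIsIn_singleton', hc]
      · rw [not_forall] at hnall
        obtain ⟨ch, hch⟩ := hnall
        rw [Classical.not_imp] at hch
        obtain ⟨hch, hchn⟩ := hch
        have b3 : ((PySem.Str.slice s (some ((k : Int) - m)) (some (k : Int))).toList.any
            (fun ch => !(PySem.Str.isIn (String.singleton ch) "ACGT"))) = true := by
          rw [List.any_eq_true]
          exact ⟨ch, hch, by simp [pvIsIn_singleton', hchn]⟩
        rw [b3]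
        simp
  simp only [pvAStep, hget, hctx, hbool]
  by_cases hg : m + 1 ≤ pvTrail cs (k+1)
  · simp [hg, pvBump]
  · simp [hg]

lemma pvFold_eq (m : Int) (hm : 0 ≤ m) (s : String) (d : PySem.Dict String (PySem.Dict String Int))
    (k : Nat) (hk : k ≤ s.toList.length) :
    (PySem.List.pyRange 0 (k : Int) 1).foldl (pvBStep m s) (d, 0)
      = ((PySem.List.pyRange m (k : Int) 1).foldl (pvAStep m s) d, pvTrail s.toList k) := by
  induction k with
  | zero =>
    rw [show ((0:Nat):Int) = 0 from rfl, PySem.List.pyRange_one_eq_nil (le_refl (0:Int)),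
        PySem.List.pyRange_one_eq_nil hm]
    simp [pvTrail]
  | succ k ih =>
    have hk' : k ≤ s.toList.length := by omega
    have hkl : k < s.toList.length := by omega
    have e1 : ((k+1 : Nat) : Int) = (k : Int) + 1 := by omega
    rw [e1, PySem.List.pyRange_one_succ_right (by omega : (0:Int) ≤ (k:Int)), List.foldl_append,
        ih hk']
    have hget : PySem.Str.pyGet? s (k : Int) = some (s.toList.getD k ' ') := by
      rw [PySem.Str.pyGet?_natCast, List.getElem?_eq_getElem hkl, List.getD_eq_getElem _ ' ' hkl]
    have hrun' : (if PySem.Chars.isIn [s.toList.getD k ' '] ("ACGT" : String).toList = true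
        then pvTrail s.toList k + 1 else 0) = pvTrail s.toList (k+1) := by
      rw [show ("ACGT" : String).toList = ['A', 'C', 'G', 'T'] from rfl, pvIsIn_singleton']
      by_cases hc : s.toList.getD k ' ' ∈ pvACGT <;> simp only [pvTrail, hc, decide_true, decide_false, if_true]; simp
    by_cases hmk : m ≤ (k : Int)
    · rw [PySem.List.pyRange_one_succ_right hmk, List.foldl_append]
      simp only [List.foldl_cons, List.foldl_nil]
      rw [pvStep_eq m hm s k hmk hkl]
      simp only [pvBStep, hget]
      simp only [PySem.Str.isIn_eq, String.toList_singleton]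
      rw [hrun']
      by_cases hg : m + 1 ≤ pvTrail s.toList (k+1)
      · rw [if_pos hg, if_pos (show pvTrail s.toList (k+1) ≥ m + 1 from hg)]
      · rw [if_neg hg, if_neg (show ¬ (pvTrail s.toList (k+1) ≥ m + 1) from hg)]
    · have hbnd := (pvTrail_bounds s.toList (k+1)).2
      have hg : ¬ (pvTrail s.toList (k+1) ≥ m + 1) := by omega
      rw [PySem.List.pyRange_one_eq_nil (by omega : (k:Int) + 1 ≤ m),
          PySem.List.pyRange_one_eq_nil (by omega : (k:Int) ≤ m)]
      simp only [List.foldl_nil, List.foldl_cons, pvBStep, hget]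
      simp only [PySem.Str.isIn_eq, String.toList_singleton]
      rw [hrun']
      rw [if_neg hg]

lemma pvStr_eq (m : Int) (hm : 0 ≤ m) (d : PySem.Dict String (PySem.Dict String Int)) (s : String) :
    pvBStr m d s = pvAStr m d s := by
  unfold pvBStr pvAStr
  by_cases hls : PySem.Str.len s ≤ m
  · rw [if_pos hls, PySem.List.pyRange_one_eq_nil (by rw [PySem.Str.len_eq] at hls ⊢; omega)]
    rfl
  · rw [if_neg hls, PySem.Str.len_eq, pvFold_eq m hm s d s.toList.length (le_refl _)]

lemma pvAStep_neg (m : Int) (hm : m < 0) (s : String)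
    (d : PySem.Dict String (PySem.Dict String Int)) (i : Int) : pvAStep m s d i = d := by
  unfold pvAStep
  rw [if_neg (by omega : ¬ m > 0)]
  cases h : PySem.Str.pyGet? s i with
  | none => rfl
  | some c =>
    simp only []
    rw [if_pos]
    have h0 : (PySem.Str.len ("" : String) != m) = true := by
      rw [show PySem.Str.len ("" : String) = 0 from rfl]
      simp only [bne_iff_ne, ne_eq]
      omega
    rw [h0]
    rfl

lemma pv_neg (seqs : List String) (m : Int) (hm : m < 0) : build_counts seqs m = [] := by
  unfold build_counts
  have hstr : ∀ (d : PySem.Dict String (PySem.Dict String Int)) (s : String), pvAStr m d s = d := by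
    intro d s
    unfold pvAStr
    induction (PySem.List.pyRange m (PySem.Str.len s) 1) generalizing d with
    | nil => rfl
    | cons i l ih => rw [List.foldl_cons, pvAStep_neg m hm s d i]; exact ih d
  have hfold : ∀ (l : List String), l.foldl (pvAStr m) PySem.Dict.empty = PySem.Dict.empty := by
    intro l
    induction l with
    | nil => rfl
    | cons s l ih => rw [List.foldl_cons, hstr]; exact ih
  rw [hfold]
  rfl

lemma pv_main (seqs : List String) (m : Int) : build_counts seqs m = build_counts_alt seqs m := by
  by_cases hm : m < 0
  · rw [pv_neg seqs m hm]
    unfold build_counts_alt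
    rw [if_pos hm]
  · unfold build_counts build_counts_alt
    rw [if_neg hm]
    have := PySem.List.foldl_congr_mem seqs (pvAStr m) (pvBStr m) PySem.Dict.empty
      (fun acc x _ => (pvStr_eq m (by omega) acc x).symm)
    rw [this]

-- ===== VERDICT (by name: the statement is the Claim_ definition above) =====
theorem build_counts_spec : Claim_equal_build_counts := by
  intro seqs m _ _
  show build_counts seqs m = build_counts_alt seqs m
  exact pv_main seqs m
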